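-- pv_equiv track=rewrite | github.com/adeelnasimsyed/Interview-Prep | freqQueries.py | freqQueries
-- ===== SOURCE A (Python) =====
-- from collections import defaultdict
--
-- def freqQueries(queries):
--
-- 	hM_val = defaultdict(int)
-- 	hM_freq = defaultdict(int)
-- 	ans = []
--
-- 	for operation, num in queries:
--
-- 		if operation == 1:
--
-- 			if num in hM_val:
-- 				freq = hM_val[num]
-- 				hM_freq[freq] -= 1
--
-- 				if hM_freq[freq] == 0:
-- 					del hM_freq[freq]
--
-- 				hM_val[num] +=1
-- 				hM_freq[freq+1] += 1
--
-- 			else: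
-- 				freq = 1
-- 				hM_val[num] +=1
-- 				hM_freq[freq] += 1
--
-- 		if operation == 2:
--
-- 			if num in hM_val:
--
-- 				freq = hM_val[num]
--
-- 				if freq == 1:
-- 					del hM_val[num]
--
-- 					if hM_freq[freq] == 1:
-- 						del hM_freq[freq]
-- 					else:
-- 						hM_freq[freq] -= 1
--
-- 				else:
-- 					hM_val[num] -= 1
-- 					hM_freq[freq] -= 1
-- 					hM_freq[freq -1] +=1
--
-- 					if hM_freq[freq] == 0:
-- 						del hM_freq[freq]
--
-- 		if operation == 3:
--
-- 			if num in hM_freq: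
--
-- 				ans.append(1)
--
-- 			else:
-- 				ans.append(0)
--
-- 	return ans
-- ===== SOURCE B (Python) =====
-- def freqQueries(queries):
--     # Single value->count map; a type-3 query scans current counts.
--     counts = {}
--     ans = []
--     for op, num in queries:
--         if op == 1:
--             counts[num] = counts.get(num, 0) + 1
--         elif op == 2:
--             c = counts.get(num, 0)
--             if c == 1:
--                 del counts[num]
--             elif c > 1:
--                 counts[num] = c - 1
--         elif op == 3:
--             ans.append(1 if num in counts.values() else 0)
--     return ans
-- ===== Notes on version B (the rewrite author's own statement) =====
-- stated objective: simpler
-- what changed: B drops A's maintained count->multiplicity index (hM_freq) entirely: it keeps one value->count dict and answers a frequency query by scanning the current counts, so all the index bookkeeping and zero-key deletion logic disappears.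
import Mathlib
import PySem

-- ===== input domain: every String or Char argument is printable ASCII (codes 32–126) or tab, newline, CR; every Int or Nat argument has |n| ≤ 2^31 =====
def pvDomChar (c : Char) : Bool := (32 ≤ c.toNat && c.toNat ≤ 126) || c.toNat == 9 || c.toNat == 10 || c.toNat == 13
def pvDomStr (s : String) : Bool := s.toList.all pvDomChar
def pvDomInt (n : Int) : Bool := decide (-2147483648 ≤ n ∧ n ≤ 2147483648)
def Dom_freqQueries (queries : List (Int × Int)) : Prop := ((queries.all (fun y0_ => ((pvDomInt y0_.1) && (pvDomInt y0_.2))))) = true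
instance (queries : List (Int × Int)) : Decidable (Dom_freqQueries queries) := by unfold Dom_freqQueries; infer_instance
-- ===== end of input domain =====

-- B keeps a single value→count dict and answers a type-3 query by scanning current
-- counts, dropping A's maintained count→multiplicity index (hM_freq) and its bookkeeping.

-- ===== PORT A =====
-- one iteration of A's loop; state = (hM_val, hM_freq, ans)
def pvStepA (st : PySem.Dict Int Int × PySem.Dict Int Int × List Int) (q : Int × Int) :
    PySem.Dict Int Int × PySem.Dict Int Int × List Int :=
  match st, q with
  | (hv, hf, ans), (op, num) =>
    -- if operation == 1
    let s1 : PySem.Dict Int Int × PySem.Dict Int Int :=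
      if op = 1 then
        if hv.contains num then
          let freq := hv.getD num 0
          let hf1 := hf.insert freq (hf.getD freq 0 - 1)
          let hf2 := if hf1.getD freq 0 = 0 then hf1.erase freq else hf1
          (hv.insert num (hv.getD num 0 + 1),
           hf2.insert (freq + 1) (hf2.getD (freq + 1) 0 + 1))
        else
          (hv.insert num (hv.getD num 0 + 1), hf.insert 1 (hf.getD 1 0 + 1))
      else (hv, hf)
    -- if operation == 2
    let s2 : PySem.Dict Int Int × PySem.Dict Int Int :=
      if op = 2 then
        if s1.1.contains num then
          let freq := s1.1.getD num 0
          if freq = 1 then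
            (s1.1.erase num,
             if s1.2.getD freq 0 = 1 then s1.2.erase freq
             else s1.2.insert freq (s1.2.getD freq 0 - 1))
          else
            let hf1 := s1.2.insert freq (s1.2.getD freq 0 - 1)
            let hf2 := hf1.insert (freq - 1) (hf1.getD (freq - 1) 0 + 1)
            (s1.1.insert num (s1.1.getD num 0 - 1),
             if hf2.getD freq 0 = 0 then hf2.erase freq else hf2)
        else s1
      else s1
    -- if operation == 3
    let ans' := if op = 3 then (if s2.2.contains num then ans ++ [1] else ans ++ [0]) else ans
    (s2.1, s2.2, ans')

def freqQueries (queries : List (Int × Int)) : List Int :=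
  (queries.foldl pvStepA (PySem.Dict.empty, PySem.Dict.empty, [])).2.2

-- ===== PORT B =====
-- one iteration of B's loop; state = (counts, ans)
def pvStepB (st : PySem.Dict Int Int × List Int) (q : Int × Int) :
    PySem.Dict Int Int × List Int :=
  match st, q with
  | (counts, ans), (op, num) =>
    if op = 1 then (counts.insert num (counts.getD num 0 + 1), ans)
    else if op = 2 then
      let c := counts.getD num 0
      if c = 1 then (counts.erase num, ans)
      else if 1 < c then (counts.insert num (c - 1), ans)
      else (counts, ans)
    else if op = 3 then
      (counts, ans ++ [if counts.values.contains num then 1 else 0])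
    else (counts, ans)

def freqQueries_alt (queries : List (Int × Int)) : List Int :=
  (queries.foldl pvStepB (PySem.Dict.empty, [])).2

-- ===== PRECONDITION & SPEC =====
def Spec_freqQueries (queries : List (Int × Int)) (out : List Int) : Prop := out = freqQueries_alt queries
instance (queries : List (Int × Int)) (out : List Int) : Decidable (Spec_freqQueries queries out) := by unfold Spec_freqQueries; infer_instance

-- ===== CLAIM (what is proved, stated in full; the proofs are below) =====
def Claim_equal_freqQueries : Prop := ∀ (queries : List (Int × Int)), Dom_freqQueries queries → Spec_freqQueries queries (freqQueries queries)

-- ===== LEMMAS AND PROOFS =====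

-- the simulation invariant: hf's keys are exactly the frequencies occurring among hv's
-- values, with hf f = number of keys of hv whose count is f; all counts positive
def pvInv (hv hf : PySem.Dict Int Int) : Prop :=
  hv.keys.Nodup ∧
  (∀ k v : Int, hv.get? k = some v → 1 ≤ v) ∧
  (∀ f : Int, hf.get? f = if hv.values.count f = 0 then none else some ((hv.values.count f : Int)))

-- get? after erase
lemma dict_get?_erase (d : PySem.Dict Int Int) (k k' : Int) :
    (d.erase k).get? k' = if k' = k then none else d.get? k' := by
  obtain ⟨l⟩ := d
  simp only [PySem.Dict.erase, PySem.Dict.get?, List.find?_filter]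
  by_cases hk : k' = k
  · subst hk
    rw [if_pos rfl, List.find?_eq_none.mpr ?_]
    · rfl
    · intro a _; simp
  · rw [if_neg hk]
    congr 2
    funext a
    by_cases ha : a.1 = k' <;> simp [ha, hk]

-- getD after erase
lemma dict_getD_erase (d : PySem.Dict Int Int) (k k' : Int) :
    (d.erase k).getD k' 0 = if k' = k then 0 else d.getD k' 0 := by
  rw [PySem.Dict.getD_eq_get?_getD, dict_get?_erase, PySem.Dict.getD_eq_get?_getD]
  split <;> rfl

-- keys stay Nodup after erase
lemma dict_nodup_keys_erase (d : PySem.Dict Int Int) (k : Int) (h : d.keys.Nodup) :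
    (d.erase k).keys.Nodup := by
  obtain ⟨l⟩ := d
  simp only [PySem.Dict.erase, PySem.Dict.keys] at *
  exact (List.filter_sublist.map Prod.fst).nodup h

-- value-count after overwriting the (unique) entry of key k, old value v, by w
lemma count_map_update (l : List (Int × Int)) (k w f v : Int)
    (hnd : (l.map Prod.fst).Nodup) (hmem : (k, v) ∈ l) :
    ((l.map (fun p => if p.1 == k then (k, w) else p)).map Prod.snd).count f
        + (if f = v then 1 else 0)
      = (l.map Prod.snd).count f + (if f = w then 1 else 0) := by
  induction l with
  | nil => cases hmem
  | cons p t ih =>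
    simp only [List.map_cons, List.nodup_cons] at hnd
    rcases List.mem_cons.mp hmem with hp | hmem'
    · subst hp
      have ht : ∀ q ∈ t, (if q.1 == k then ((k : Int), w) else q) = q := by
        intro q hq
        have hqk : q.1 ≠ k := by
          intro he
          have hmm : q.1 ∈ t.map Prod.fst := List.mem_map_of_mem (f := Prod.fst) hq
          rw [he] at hmm
          exact hnd.1 hmm
        simp [hqk]
      simp only [List.map_cons, beq_self_eq_true, if_true]
      rw [List.map_congr_left ht]
      simp only [List.map_id', List.count_cons, beq_iff_eq]
      split_ifs <;> omega
    · have hpk : p.1 ≠ k := by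
        intro he
        exact hnd.1 (he ▸ List.mem_map_of_mem (f := Prod.fst) hmem')
      have ih' := ih hnd.2 hmem'
      have hb : (p.1 == k) = false := by simp [hpk]
      simp only [List.map_cons, List.count_cons, beq_iff_eq]
      simp only [beq_iff_eq] at ih'
      split_ifs at ih' ⊢ <;> omega

-- value-count after erasing the (unique) entry of key k, old value v
lemma count_filter_erase (l : List (Int × Int)) (k f v : Int)
    (hnd : (l.map Prod.fst).Nodup) (hmem : (k, v) ∈ l) :
    ((l.filter (fun p => !(p.1 == k))).map Prod.snd).count f + (if f = v then 1 else 0)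
      = (l.map Prod.snd).count f := by
  induction l with
  | nil => cases hmem
  | cons p t ih =>
    simp only [List.map_cons, List.nodup_cons] at hnd
    rcases List.mem_cons.mp hmem with hp | hmem'
    · subst hp
      have ht : ∀ q ∈ t, (!(q.1 == k)) = true := by
        intro q hq
        have hqk : q.1 ≠ k := by
          intro he
          have hmm : q.1 ∈ t.map Prod.fst := List.mem_map_of_mem (f := Prod.fst) hq
          rw [he] at hmm
          exact hnd.1 hmm
        simp [hqk]
      rw [List.filter_cons]
      simp only [beq_self_eq_true, Bool.not_true, Bool.false_eq_true, if_false]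
      rw [List.filter_eq_self.mpr ht]
      simp only [List.map_cons, List.count_cons, beq_iff_eq]
      split_ifs <;> omega
    · have hpk : p.1 ≠ k := by
        intro he
        exact hnd.1 (he ▸ List.mem_map_of_mem (f := Prod.fst) hmem')
      have ih' := ih hnd.2 hmem'
      have hb : (!(p.1 == k)) = true := by simp [hpk]
      rw [List.filter_cons, if_pos hb]
      simp only [List.map_cons, List.count_cons, beq_iff_eq]
      -- ih' already in the right shape
      split_ifs at ih' ⊢ <;> omega

-- getD on hf reads the multiplicity, under the invariant
lemma inv_getD (hv hf : PySem.Dict Int Int)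
    (hspec : ∀ f : Int, hf.get? f = if hv.values.count f = 0 then none else some ((hv.values.count f : Int)))
    (f : Int) : hf.getD f 0 = (hv.values.count f : Int) := by
  rw [PySem.Dict.getD_eq_get?_getD, hspec f]
  split
  · simp_all
  · rfl

-- value-count of hv.values after overwriting an existing key
lemma count_values_insert_mem (hv : PySem.Dict Int Int) (num v w f : Int)
    (hnd : hv.keys.Nodup) (hget : hv.get? num = some v) :
    (hv.insert num w).values.count f + (if f = v then 1 else 0)
      = hv.values.count f + (if f = w then 1 else 0) := by
  have hmem : (num, v) ∈ hv.items := PySem.Dict.mem_items_of_get?_eq_some hv hget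
  have hc : hv.contains num = true := by
    rw [PySem.Dict.contains_eq_isSome_get?, hget]; rfl
  rw [PySem.Dict.values, PySem.Dict.items_insert_of_contains hv w hc]
  exact count_map_update hv.items num w f v hnd hmem

-- value-count of hv.values after erasing an existing key
lemma count_values_erase_mem (hv : PySem.Dict Int Int) (num v f : Int)
    (hnd : hv.keys.Nodup) (hget : hv.get? num = some v) :
    (hv.erase num).values.count f + (if f = v then 1 else 0) = hv.values.count f := by
  have hmem : (num, v) ∈ hv.items := PySem.Dict.mem_items_of_get?_eq_some hv hget
  rw [PySem.Dict.values, PySem.Dict.erase]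
  exact count_filter_erase hv.items num f v hnd hmem

-- value-count of hv.values after inserting a fresh key
lemma count_values_insert_new (hv : PySem.Dict Int Int) (num w f : Int)
    (hget : hv.get? num = none) :
    (hv.insert num w).values.count f = hv.values.count f + (if f = w then 1 else 0) := by
  have hc : hv.contains num = false := by
    rw [PySem.Dict.contains_eq_isSome_get?, hget]; rfl
  rw [PySem.Dict.values, PySem.Dict.items_insert_of_not_contains hv w hc]
  simp only [List.map_append, List.map_cons, List.map_nil, List.count_append,
    List.count_cons, List.count_nil, beq_iff_eq, PySem.Dict.values]
  split_ifs with h1 h2 h2 <;> first | rfl | (exact absurd h1.symm h2) | (exact absurd h2.symm h1)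

-- a looked-up value occurs among the values
lemma count_values_pos (hv : PySem.Dict Int Int) (num v : Int)
    (hget : hv.get? num = some v) : 1 ≤ hv.values.count v := by
  have hmem : (num, v) ∈ hv.items := PySem.Dict.mem_items_of_get?_eq_some hv hget
  have : v ∈ hv.values := by
    rw [PySem.Dict.values]
    exact List.mem_map_of_mem (f := Prod.snd) hmem
  exact List.count_pos_iff.mpr this

-- invariant through an op-1 step on a present key
lemma inv_op1_mem (hv hf : PySem.Dict Int Int) (num v : Int)
    (h : pvInv hv hf) (hget : hv.get? num = some v) (hf2 : PySem.Dict Int Int)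
    (hhf2 : hf2 = (if (hf.insert v (hf.getD v 0 - 1)).getD v 0 = 0
                   then (hf.insert v (hf.getD v 0 - 1)).erase v
                   else hf.insert v (hf.getD v 0 - 1))) :
    pvInv (hv.insert num (v + 1)) (hf2.insert (v + 1) (hf2.getD (v + 1) 0 + 1)) := by
  obtain ⟨hnd, hpos, hspec⟩ := h
  have hfgd := inv_getD hv hf hspec
  have hv1 : 1 ≤ v := hpos num v hget
  have hcv : 1 ≤ hv.values.count v := count_values_pos hv num v hget
  have hne : v + 1 ≠ v := by omega
  have hgd1 : (hf.insert v (hf.getD v 0 - 1)).getD v 0 = (hv.values.count v : Int) - 1 := by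
    rw [PySem.Dict.getD_insert_self, hfgd v]
  have hgd2 : hf2.getD (v + 1) 0 = (hv.values.count (v + 1) : Int) := by
    rw [hhf2]
    split
    · rw [dict_getD_erase, if_neg hne, PySem.Dict.getD_insert_of_ne _ _ _ hne, hfgd]
    · rw [PySem.Dict.getD_insert_of_ne _ _ _ hne, hfgd]
  refine ⟨PySem.Dict.nodup_keys_insert hv num (v + 1) hnd, ?_, ?_⟩
  · intro k u hk
    rw [PySem.Dict.get?_insert] at hk
    split at hk
    · injection hk with h'; omega
    · exact hpos k u hk
  · intro f
    have hcnt := count_values_insert_mem hv num v (v + 1) f hnd hget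
    rw [PySem.Dict.get?_insert]
    by_cases hfv1 : f = v + 1
    · rw [hfv1] at hcnt ⊢
      rw [if_neg hne, if_pos rfl] at hcnt
      rw [if_pos rfl, hgd2, if_neg (by omega)]
      congr 1
      omega
    · rw [if_neg hfv1] at hcnt ⊢
      by_cases hfv : f = v
      · rw [hfv] at hcnt ⊢
        rw [if_pos rfl] at hcnt
        rw [hhf2]
        by_cases hcase : (hf.insert v (hf.getD v 0 - 1)).getD v 0 = 0
        · have hcv1 : hv.values.count v = 1 := by
            rw [hgd1] at hcase; omega
          rw [if_pos hcase, dict_get?_erase, if_pos rfl, if_pos (by omega)]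
        · have hcv2 : 2 ≤ hv.values.count v := by
            rw [hgd1] at hcase
            rcases Nat.lt_or_ge (hv.values.count v) 2 with hlt | hge
            · interval_cases h' : hv.values.count v ; simp_all
            · exact hge
          rw [if_neg hcase, PySem.Dict.get?_insert_self, if_neg (by omega)]
          rw [hfgd v]
          congr 1
          omega
      · rw [if_neg hfv] at hcnt
        have hcnt' : (hv.insert num (v + 1)).values.count f = hv.values.count f := by omega
        rw [hcnt', hhf2]
        have hstep : (if (hf.insert v (hf.getD v 0 - 1)).getD v 0 = 0
             then (hf.insert v (hf.getD v 0 - 1)).erase v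
             else hf.insert v (hf.getD v 0 - 1)).get? f = hf.get? f := by
          split
          · rw [dict_get?_erase, if_neg hfv, PySem.Dict.get?_insert_of_ne _ _ hfv]
          · rw [PySem.Dict.get?_insert_of_ne _ _ hfv]
        rw [hstep, hspec f]

-- invariant through an op-1 step on a fresh key
lemma inv_op1_new (hv hf : PySem.Dict Int Int) (num : Int)
    (h : pvInv hv hf) (hget : hv.get? num = none) :
    pvInv (hv.insert num 1) (hf.insert 1 (hf.getD 1 0 + 1)) := by
  obtain ⟨hnd, hpos, hspec⟩ := h
  have hfgd := inv_getD hv hf hspec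
  refine ⟨PySem.Dict.nodup_keys_insert hv num 1 hnd, ?_, ?_⟩
  · intro k u hk
    rw [PySem.Dict.get?_insert] at hk
    split at hk
    · injection hk with h'; omega
    · exact hpos k u hk
  · intro f
    have hcnt := count_values_insert_new hv num 1 f hget
    rw [PySem.Dict.get?_insert]
    by_cases hf1 : f = 1
    · subst hf1
      rw [if_pos rfl] at hcnt ⊢
      rw [hfgd 1, hcnt, if_neg (by omega)]
      push_cast
      ring_nf
    · rw [if_neg hf1] at hcnt ⊢
      rw [hspec f, hcnt]
      simp

-- invariant through an op-2 step on a key of count 1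
lemma inv_op2_one (hv hf : PySem.Dict Int Int) (num : Int)
    (h : pvInv hv hf) (hget : hv.get? num = some 1) :
    pvInv (hv.erase num)
      (if hf.getD 1 0 = 1 then hf.erase 1 else hf.insert 1 (hf.getD 1 0 - 1)) := by
  obtain ⟨hnd, hpos, hspec⟩ := h
  have hfgd := inv_getD hv hf hspec
  have hc1 : 1 ≤ hv.values.count 1 := count_values_pos hv num 1 hget
  refine ⟨dict_nodup_keys_erase hv num hnd, ?_, ?_⟩
  · intro k u hk
    rw [dict_get?_erase] at hk
    split at hk
    · cases hk
    · exact hpos k u hk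
  · intro f
    have hcnt := count_values_erase_mem hv num 1 f hnd hget
    by_cases hone : hv.values.count 1 = 1
    · rw [if_pos (by rw [hfgd 1, hone]; rfl), dict_get?_erase]
      by_cases hf1 : f = 1
      · rw [hf1] at hcnt ⊢
        rw [if_pos rfl] at hcnt
        rw [if_pos rfl, if_pos (by omega)]
      · rw [if_neg hf1] at hcnt
        rw [if_neg hf1, hspec f, show hv.values.count f = (hv.erase num).values.count f by omega]
    · rw [if_neg (by rw [hfgd 1]; exact_mod_cast fun he => hone (by exact_mod_cast he)),
        PySem.Dict.get?_insert]
      by_cases hf1 : f = 1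
      · rw [hf1] at hcnt ⊢
        rw [if_pos rfl] at hcnt
        rw [if_pos rfl, hfgd 1, if_neg (by omega)]
        congr 1
        omega
      · rw [if_neg hf1] at hcnt
        rw [if_neg hf1, hspec f, show hv.values.count f = (hv.erase num).values.count f by omega]

-- invariant through an op-2 step on a key of count > 1
lemma inv_op2_gt (hv hf : PySem.Dict Int Int) (num v : Int)
    (h : pvInv hv hf) (hget : hv.get? num = some v) (hv1 : v ≠ 1)
    (hf2 : PySem.Dict Int Int)
    (hhf2 : hf2 = (hf.insert v (hf.getD v 0 - 1)).insert (v - 1)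
                    ((hf.insert v (hf.getD v 0 - 1)).getD (v - 1) 0 + 1)) :
    pvInv (hv.insert num (v - 1)) (if hf2.getD v 0 = 0 then hf2.erase v else hf2) := by
  obtain ⟨hnd, hpos, hspec⟩ := h
  have hfgd := inv_getD hv hf hspec
  have hvge : 2 ≤ v := by
    have := hpos num v hget; omega
  have hcv : 1 ≤ hv.values.count v := count_values_pos hv num v hget
  have hne : v - 1 ≠ v := by omega
  have hgdv : hf2.getD v 0 = (hv.values.count v : Int) - 1 := by
    rw [hhf2, PySem.Dict.getD_insert_of_ne _ _ _ (Ne.symm hne),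
      PySem.Dict.getD_insert_self, hfgd v]
  have hgdm : hf2.getD (v - 1) 0 = (hv.values.count (v - 1) : Int) + 1 := by
    rw [hhf2, PySem.Dict.getD_insert_self, PySem.Dict.getD_insert_of_ne _ _ _ hne, hfgd]
  refine ⟨PySem.Dict.nodup_keys_insert hv num (v - 1) hnd, ?_, ?_⟩
  · intro k u hk
    rw [PySem.Dict.get?_insert] at hk
    split at hk
    · injection hk with h'; omega
    · exact hpos k u hk
  · intro f
    have hcnt := count_values_insert_mem hv num v (v - 1) f hnd hget
    by_cases hfm : f = v - 1
    · rw [hfm] at hcnt ⊢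
      rw [if_neg hne, if_pos rfl] at hcnt
      have hget' : (if hf2.getD v 0 = 0 then hf2.erase v else hf2).get? (v - 1)
          = hf2.get? (v - 1) := by
        split
        · rw [dict_get?_erase, if_neg hne]
        · rfl
      rw [hget', hhf2, PySem.Dict.get?_insert_self]
      have : ((hf.insert v (hf.getD v 0 - 1)).getD (v - 1) 0 + 1) = hf2.getD (v - 1) 0 := by
        rw [hhf2, PySem.Dict.getD_insert_self]
      rw [this, hgdm, if_neg (by omega)]
      congr 1
      omega
    · rw [if_neg hfm] at hcnt
      by_cases hfv : f = v
      · rw [hfv] at hcnt ⊢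
        rw [if_pos rfl] at hcnt
        by_cases hcase : hf2.getD v 0 = 0
        · have hcv1 : hv.values.count v = 1 := by
            rw [hgdv] at hcase; omega
          rw [if_pos hcase, dict_get?_erase, if_pos rfl, if_pos (by omega)]
        · have hcv2 : 2 ≤ hv.values.count v := by
            rw [hgdv] at hcase
            rcases Nat.lt_or_ge (hv.values.count v) 2 with hlt | hge
            · interval_cases h' : hv.values.count v ; simp_all
            · exact hge
          rw [if_neg hcase, hhf2, PySem.Dict.get?_insert_of_ne _ _ (Ne.symm hne),
            PySem.Dict.get?_insert_self, hfgd v, if_neg (by omega)]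
          congr 1
          omega
      · rw [if_neg hfv] at hcnt
        have hcnt' : (hv.insert num (v - 1)).values.count f = hv.values.count f := by omega
        have hget' : (if hf2.getD v 0 = 0 then hf2.erase v else hf2).get? f
            = hf.get? f := by
          have hbase : hf2.get? f = hf.get? f := by
            rw [hhf2, PySem.Dict.get?_insert_of_ne _ _ hfm,
              PySem.Dict.get?_insert_of_ne _ _ hfv]
          split
          · rw [dict_get?_erase, if_neg hfv, hbase]
          · exact hbase
        rw [hget', hcnt', hspec f]

-- the type-3 answers agree under the invariant
lemma inv_contains (hv hf : PySem.Dict Int Int) (num : Int) (h : pvInv hv hf) :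
    hf.contains num = hv.values.contains num := by
  obtain ⟨-, -, hspec⟩ := h
  rw [PySem.Dict.contains_eq_isSome_get?, hspec num]
  by_cases hm : num ∈ hv.values
  · rw [if_neg (by simpa [Nat.pos_iff_ne_zero] using List.count_pos_iff.mpr hm)]
    simp [hm]
  · rw [if_pos (by simpa using List.count_eq_zero.mpr hm)]
    simp [hm]

-- one step of A simulated by one step of B
lemma pvStep_sim (hv hf : PySem.Dict Int Int) (ans : List Int) (q : Int × Int)
    (h : pvInv hv hf) :
    ∃ hf', pvStepA (hv, hf, ans) q = ((pvStepB (hv, ans) q).1, hf', (pvStepB (hv, ans) q).2)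
      ∧ pvInv (pvStepB (hv, ans) q).1 hf' := by
  obtain ⟨op, num⟩ := q
  by_cases hop1 : op = 1
  · subst hop1
    simp only [pvStepA, pvStepB, reduceIte]
    by_cases hcont : hv.contains num = true
    · have hsome : (hv.get? num).isSome := by
        rw [← PySem.Dict.contains_eq_isSome_get?, hcont]
      obtain ⟨v, hget⟩ := Option.isSome_iff_exists.mp hsome
      have hgd : hv.getD num 0 = v := PySem.Dict.getD_of_get?_eq_some hv 0 hget
      rw [if_pos hcont, hgd]
      exact ⟨_, rfl, inv_op1_mem hv hf num v h hget _ rfl⟩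
    · have hcf : hv.contains num = false := by
        cases hck : hv.contains num
        · rfl
        · exact absurd hck hcont
      have hnone : hv.get? num = none := by
        have hc' := hcf
        rw [PySem.Dict.contains_eq_isSome_get?] at hc'
        exact Option.not_isSome_iff_eq_none.mp (by simp [hc'])
      rw [if_neg hcont, PySem.Dict.getD_of_not_contains hv 0 hcf, zero_add]
      exact ⟨_, rfl, inv_op1_new hv hf num h hnone⟩
  · by_cases hop2 : op = 2
    · subst hop2
      simp only [pvStepA, pvStepB, reduceIte, if_neg (show ¬((2 : Int) = 1) from by decide),
        if_neg (show ¬((2 : Int) = 3) from by decide)]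
      by_cases hcont : hv.contains num = true
      · have hsome : (hv.get? num).isSome := by
          rw [← PySem.Dict.contains_eq_isSome_get?, hcont]
        obtain ⟨v, hget⟩ := Option.isSome_iff_exists.mp hsome
        have hgd : hv.getD num 0 = v := PySem.Dict.getD_of_get?_eq_some hv 0 hget
        have hv1 : 1 ≤ v := h.2.1 num v hget
        rw [if_pos hcont, hgd]
        by_cases hvone : v = 1
        · subst hvone
          rw [if_pos rfl, if_pos rfl]
          exact ⟨_, rfl, inv_op2_one hv hf num h hget⟩
        · rw [if_neg hvone, if_neg hvone, if_pos (by omega : (1 : Int) < v)]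
          exact ⟨_, rfl, inv_op2_gt hv hf num v h hget hvone _ rfl⟩
      · have hcf : hv.contains num = false := by
          cases hck : hv.contains num
          · rfl
          · exact absurd hck hcont
        rw [if_neg hcont, PySem.Dict.getD_of_not_contains hv 0 hcf]
        rw [if_neg (by norm_num : ¬(0 : Int) = 1), if_neg (by norm_num : ¬(1 : Int) < 0)]
        exact ⟨hf, rfl, h⟩
    · by_cases hop3 : op = 3
      · subst hop3
        simp only [pvStepA, pvStepB, reduceIte, if_neg (show ¬((3 : Int) = 1) from by decide),
          if_neg (show ¬((3 : Int) = 2) from by decide)]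
        refine ⟨hf, ?_, h⟩
        rw [inv_contains hv hf num h]
        cases hb : hv.values.contains num <;> simp
      · simp only [pvStepA, pvStepB, if_neg hop1, if_neg hop2, if_neg hop3]
        exact ⟨hf, rfl, h⟩

-- the two loops produce the same answer list from invariant-linked states
lemma pvLoop (qs : List (Int × Int)) : ∀ (hv hf : PySem.Dict Int Int) (ans : List Int),
    pvInv hv hf → (qs.foldl pvStepA (hv, hf, ans)).2.2 = (qs.foldl pvStepB (hv, ans)).2 := by
  induction qs with
  | nil => intro hv hf ans _; rfl
  | cons q t ih =>
    intro hv hf ans h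
    obtain ⟨hf', heq, hinv⟩ := pvStep_sim hv hf ans q h
    rw [List.foldl_cons, List.foldl_cons, heq]
    have := ih (pvStepB (hv, ans) q).1 hf' (pvStepB (hv, ans) q).2 hinv
    simpa using this

lemma pvInv_empty : pvInv PySem.Dict.empty PySem.Dict.empty := by
  refine ⟨by simp [PySem.Dict.keys, PySem.Dict.empty], ?_, ?_⟩
  · intro k v hkv; simp [PySem.Dict.get?, PySem.Dict.empty] at hkv
  · intro f; simp [PySem.Dict.get?, PySem.Dict.empty, PySem.Dict.values]

-- ===== VERDICT (by name: the statement is the Claim_ definition above) =====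
theorem freqQueries_spec : Claim_equal_freqQueries := by
  intro queries _
  unfold Spec_freqQueries freqQueries freqQueries_alt
  exact pvLoop queries PySem.Dict.empty PySem.Dict.empty [] pvInv_empty
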